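/-
  SMOKE TEST OF THE SEGMENT FAMILY OF codebook_decode_deinterleave_repeat (Vorbis/Spec/Codebook/Deint.lean): the assertions CHAIN.
  The composition unit is provable from the seven claims by `ReachVia.trans` and an induction on `total_decode` for loop 1901:
  every exit assertion of a segment IS the entry assertion of its successor, and a round lowers the measure by `effective ≥ 1`.
-/
import Vorbis.Spec.Units.codebook_decode_deinterleave_repeat_COMPOSITION
namespace Vorbis.Spec.Deint.Test
open X86 X86.User Asan

/-- **From the loop head to the contract's `Returned`**, by induction on `total_decode`: `td ≤ 0` leaves through the
store-back; the three `return 0` exits leave through segment .6 or straight to the epilogue; a round goes through one of the two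
arms to the join and back to the head with `td − eff`, `eff ≥ 1`, `td ≥ 1`. -/
theorem head_returns {Lay : Layout} {μ : Microarch} {u₀ : State}
    (h2 : Claim2 Lay μ u₀) (h3 : Claim3 Lay μ u₀) (h4 : Claim4 Lay μ u₀) (h5 : Claim5 Lay μ u₀) (h6 : Claim6 Lay μ u₀)
    (h7 : Claim7 Lay μ u₀) (others : List Obj) (frames : List (Nat × FrameLayout)) (Blk : Block → Prop) (len : Nat)
    (ret : Word) (e : State) :
    ∀ (n : Nat) (ci pi eff : Nat) (td : Int) (u : State), td.toNat ≤ n →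
      AtHead others frames Blk len u₀ ret e ci pi eff td u →
      ReachVia Lay μ WayInv u
        (Returned (conv u₀) (codebook_decode_deinterleave_repeat.spec others frames Blk len) e ret) := by
  intro n
  induction n with
  | zero =>
    intro ci pi eff td u hn hu
    refine (h2 others frames Blk len ret e u ci pi eff td hu).trans ?_
    intro v hv
    rcases hv with hs | ⟨eff', zd, hq⟩ | ⟨eff', zd, hp⟩ | hf1 | hf2 | hep
    · exact (h6 others frames Blk len ret e v (Or.inl ⟨ci, pi, hs⟩)).trans
        (fun w hw => h7 others frames Blk len ret e w hw)
    · have := hq.round.td_pos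
      omega
    · have := hp.round.td_pos
      omega
    · exact (h6 others frames Blk len ret e v (Or.inr (Or.inl hf1))).trans
        (fun w hw => h7 others frames Blk len ret e w hw)
    · exact (h6 others frames Blk len ret e v (Or.inr (Or.inr hf2))).trans
        (fun w hw => h7 others frames Blk len ret e w hw)
    · exact h7 others frames Blk len ret e v hep
  | succ n ih =>
    intro ci pi eff td u hn hu
    refine (h2 others frames Blk len ret e u ci pi eff td hu).trans ?_
    intro v hv
    rcases hv with hs | ⟨eff', zd, hq⟩ | ⟨eff', zd, hp⟩ | hf1 | hf2 | hep
    · exact (h6 others frames Blk len ret e v (Or.inl ⟨ci, pi, hs⟩)).trans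
        (fun w hw => h7 others frames Blk len ret e w hw)
    · have ht := hq.round.td_pos
      have he := hq.round.eff_pos
      refine (h3 others frames Blk len ret e v ci pi eff' zd td hq).trans ?_
      intro w hw
      obtain ⟨ci', pi', hj⟩ := hw
      refine (h5 others frames Blk len ret e w ci' pi' eff' td hj).trans ?_
      intro x hx
      exact ih ci' pi' eff' (td - eff') x (by omega) hx
    · have ht := hp.round.td_pos
      have he := hp.round.eff_pos
      refine (h4 others frames Blk len ret e v ci pi eff' zd td hp).trans ?_
      intro w hw
      obtain ⟨ci', pi', hj⟩ := hw
      refine (h5 others frames Blk len ret e w ci' pi' eff' td hj).trans ?_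
      intro x hx
      exact ih ci' pi' eff' (td - eff') x (by omega) hx
    · exact (h6 others frames Blk len ret e v (Or.inr (Or.inl hf1))).trans
        (fun w hw => h7 others frames Blk len ret e w hw)
    · exact (h6 others frames Blk len ret e v (Or.inr (Or.inr hf2))).trans
        (fun w hw => h7 others frames Blk len ret e w hw)
    · exact h7 others frames Blk len ret e v hep

/-- **The composition unit of codebook_decode_deinterleave_repeat is provable from the claims alone.** -/
example : Vorbis.Spec.codebook_decode_deinterleave_repeat_COMPOSITION.Statement := by
  intro Lay _ μ _ u₀ h1 h2 h3 h4 h5 h6 h7 others frames Blk len e ret he hpre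
  refine (h1 others frames Blk len ret e he hpre).trans ?_
  intro v hv
  rcases hv with ⟨ci, pi, td, hh⟩ | hep
  · exact head_returns h2 h3 h4 h5 h6 h7 others frames Blk len ret e td.toNat ci pi (dimOf e) td v (Nat.le_refl _) hh
  · exact h7 others frames Blk len ret e v hep

end Vorbis.Spec.Deint.Test
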